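-- pv_equiv track=rewrite | github.com/mike-mcrae/triss-unified-deploy | pipeline/scripts/v3/1.parse_rss_htmls.py | count_agg_types
-- ===== SOURCE A (Python) =====
-- AGG_SCHEME = {
--     "agg_journal_articles": [
--         "Journal Article",
--         "Research Note",
--         "Journal",
--         "Published Abstract",
--     ],
--     "agg_books_chapters": [
--         "Book",
--         "Book Chapter",
--         "Critical Edition (Book)",
--         "Critical Edition (Chapter)",
--     ],
--     "agg_conference_outputs": [
--         "Conference Paper",
--         "Proceedings of a Conference",
--         "Meeting Abstract",
--         "Poster",
--     ],
--     "agg_presentations": [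
--         "Invited Talk",
--         "Oral Presentation",
--     ],
--     "agg_reports_working": [
--         "Report",
--         "Working Paper",
--         "Protocol or guideline",
--     ],
--     "agg_other": [
--         "Archaeological excavation work",
--         "Book Review",
--         "Broadcast",
--         "Campus Company",
--         "Case Study",
--         "Dataset",
--         "Digital research resource production",
--         "Editorial Board",
--         "Exhibition",
--         "Fiction and creative prose",
--         "Fieldwork collection",
--         "Film production",
--         "Impact Case Study",
--         "Map, GIS map",
--         "Meetings /Conferences Organised",
--         "Miscellaneous",
--         "Music Production",
--         "News Item",
--         "Newspaper/Magazine Articles",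
--         "Patent",
--         "Poetry",
--         "Review",
--         "Review Article",
--         "Script",
--         "Software",
--         "Test or assessment",
--         "Theatre Production",
--         "Thesis",
--         "Translation",
--         "Visual art production",
--         "Item in dictionary or encyclopaedia, etc",
--     ],
-- }
--
-- def pub_year_is_2019_plus(pub):
--     year = pub.get("Year") or pub.get("Year Descending") or ""
--     year = str(year).strip()
--     if year.isdigit() and int(year) >= 2019:
--         return True
--     return False
--
-- def count_agg_types(pubs, only_2019_plus=False):
--     counts = {k: 0 for k in AGG_SCHEME.keys()}
--     type_to_group = {}
--     for grp, types in AGG_SCHEME.items():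
--         for t in types:
--             type_to_group[t] = grp
--
--     for pub in pubs:
--         if not isinstance(pub, dict):
--             continue
--         if only_2019_plus and not pub_year_is_2019_plus(pub):
--             continue
--         ptype = pub.get("Publication Type")
--         if not ptype:
--             continue
--         grp = type_to_group.get(ptype)
--         if grp:
--             counts[grp] += 1
--         else:
--             # unseen type falls into other
--             counts["agg_other"] += 1
--
--     return counts
-- ===== SOURCE B (Python) =====
-- AGG_SCHEME = {
--     "agg_journal_articles": [
--         "Journal Article",
--         "Research Note",
--         "Journal",
--         "Published Abstract",
--     ],
--     "agg_books_chapters": [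
--         "Book",
--         "Book Chapter",
--         "Critical Edition (Book)",
--         "Critical Edition (Chapter)",
--     ],
--     "agg_conference_outputs": [
--         "Conference Paper",
--         "Proceedings of a Conference",
--         "Meeting Abstract",
--         "Poster",
--     ],
--     "agg_presentations": [
--         "Invited Talk",
--         "Oral Presentation",
--     ],
--     "agg_reports_working": [
--         "Report",
--         "Working Paper",
--         "Protocol or guideline",
--     ],
--     "agg_other": [
--         "Archaeological excavation work",
--         "Book Review",
--         "Broadcast",
--         "Campus Company",
--         "Case Study",
--         "Dataset",
--         "Digital research resource production",
--         "Editorial Board",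
--         "Exhibition",
--         "Fiction and creative prose",
--         "Fieldwork collection",
--         "Film production",
--         "Impact Case Study",
--         "Map, GIS map",
--         "Meetings /Conferences Organised",
--         "Miscellaneous",
--         "Music Production",
--         "News Item",
--         "Newspaper/Magazine Articles",
--         "Patent",
--         "Poetry",
--         "Review",
--         "Review Article",
--         "Script",
--         "Software",
--         "Test or assessment",
--         "Theatre Production",
--         "Thesis",
--         "Translation",
--         "Visual art production",
--         "Item in dictionary or encyclopaedia, etc",
--     ],
-- }
--
-- def pub_year_is_2019_plus(pub):
--     year = pub.get("Year") or pub.get("Year Descending") or ""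
--     year = str(year).strip()
--     if year.isdigit() and int(year) >= 2019:
--         return True
--     return False
--
-- def count_agg_types(pubs, only_2019_plus=False):
--     # Pass 1: tally the surviving 'Publication Type' values.
--     tally = {}
--     for pub in pubs:
--         if not isinstance(pub, dict):
--             continue
--         if only_2019_plus and not pub_year_is_2019_plus(pub):
--             continue
--         ptype = pub.get("Publication Type")
--         if ptype:
--             tally[ptype] = tally.get(ptype, 0) + 1
--     # Pass 2: aggregate the tally per group.
--     counts = {grp: sum(tally.get(t, 0) for t in types)
--               for grp, types in AGG_SCHEME.items()}
--     # Types never listed in any group fall through into agg_other.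
--     known = {t for types in AGG_SCHEME.values() for t in types}
--     counts["agg_other"] += sum(n for t, n in tally.items() if t not in known)
--     return counts
-- ===== Notes on version B (the rewrite author's own statement) =====
-- stated objective: alternative
-- what changed: Replaces A's per-publication group assignment (reverse type-to-group index consulted inside the loop, incrementing the group counter) by a tally-then-aggregate decomposition: one pass builds a Counter of surviving Publication Type values, then the group counts are computed by summing the tally over each group's type list, with unlisted tallied types folded into agg_other afterwards.
import Mathlib
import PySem

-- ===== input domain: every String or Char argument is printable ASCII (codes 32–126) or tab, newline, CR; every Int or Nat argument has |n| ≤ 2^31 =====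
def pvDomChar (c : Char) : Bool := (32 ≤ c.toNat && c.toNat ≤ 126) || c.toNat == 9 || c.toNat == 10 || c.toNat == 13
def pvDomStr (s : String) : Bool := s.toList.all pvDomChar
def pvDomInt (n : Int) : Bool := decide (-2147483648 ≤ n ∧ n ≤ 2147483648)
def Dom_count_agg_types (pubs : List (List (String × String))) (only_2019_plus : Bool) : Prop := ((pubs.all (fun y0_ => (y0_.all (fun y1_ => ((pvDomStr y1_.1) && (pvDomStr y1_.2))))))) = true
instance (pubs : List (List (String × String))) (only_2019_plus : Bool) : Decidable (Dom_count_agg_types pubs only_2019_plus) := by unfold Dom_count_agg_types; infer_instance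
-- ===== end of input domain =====

set_option maxRecDepth 40000

-- B replaces A's per-publication reverse-index lookup-and-increment by a tally-then-aggregate
-- decomposition (count the surviving Publication Type values once, then sum the tally per group);
-- same cost, different structure (objective: alternative).

-- ===== PORT A =====
-- module constant AGG_SCHEME (a dict of lists, in source order)
def aggScheme : List (String × List String) := [
  ("agg_journal_articles", ["Journal Article","Research Note","Journal","Published Abstract"]),
  ("agg_books_chapters", ["Book","Book Chapter","Critical Edition (Book)","Critical Edition (Chapter)"]),
  ("agg_conference_outputs", ["Conference Paper","Proceedings of a Conference","Meeting Abstract","Poster"]),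
  ("agg_presentations", ["Invited Talk","Oral Presentation"]),
  ("agg_reports_working", ["Report","Working Paper","Protocol or guideline"]),
  ("agg_other", ["Archaeological excavation work","Book Review","Broadcast","Campus Company","Case Study","Dataset","Digital research resource production","Editorial Board","Exhibition","Fiction and creative prose","Fieldwork collection","Film production","Impact Case Study","Map, GIS map","Meetings /Conferences Organised","Miscellaneous","Music Production","News Item","Newspaper/Magazine Articles","Patent","Poetry","Review","Review Article","Script","Software","Test or assessment","Theatre Production","Thesis","Translation","Visual art production","Item in dictionary or encyclopaedia, etc"])]

-- 'x or y' on an optional string: x if it is a truthy (non-empty) string, else y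
def pyOrStr (x : Option String) (y : String) : String :=
  match x with
  | some s => if s = "" then y else s
  | none => y

-- module helper pub_year_is_2019_plus (used by both programs; str(year) is the identity on strings)
def pubYear2019plus (pub : PySem.Dict String String) : Bool :=
  let year := pyOrStr (pub.get? "Year") (pyOrStr (pub.get? "Year Descending") "")
  let year := PySem.Str.strip year
  PySem.Str.strIsdigit year && decide ((PySem.Int.ofStr? year).getD 0 ≥ 2019)

-- 'counts = {k: 0 for k in AGG_SCHEME.keys()}' (hoisted from A's body as a named helper)
def countsInit : PySem.Dict String Int :=
  (aggScheme.map (fun gt => gt.1)).foldl (fun d k => d.insert k 0) PySem.Dict.empty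

-- 'type_to_group' reverse index built by A's nested loop (hoisted from A's body as a named helper)
def typeToGroup : PySem.Dict String String :=
  aggScheme.foldl (fun d gt => gt.2.foldl (fun d t => d.insert t gt.1) d) PySem.Dict.empty

-- port of A; 'isinstance(pub, dict)' is always true under the typing (each pub is a dict);
-- 'counts[grp] += 1' is modify with default 0 — exact, since grp is always a key of counts
def count_agg_types (pubs : List (List (String × String))) (only_2019_plus : Bool) : List (String × Int) :=
  (pubs.foldl
    (fun counts pub =>
      let pd := PySem.Dict.ofList pub
      if only_2019_plus && !(pubYear2019plus pd) then counts
      else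
        match pd.get? "Publication Type" with
        | none => counts
        | some ptype =>
          if ptype = "" then counts
          else
            match typeToGroup.get? ptype with
            | some grp =>
              if grp ≠ "" then counts.modify grp 0 (· + 1)
              else counts.modify "agg_other" 0 (· + 1)
            | none => counts.modify "agg_other" 0 (· + 1))
    countsInit).items

-- ===== PORT B =====
-- port of B (Source B): tally the surviving ptypes, then aggregate per group, then fold the
-- unlisted tallied types into agg_other
def count_agg_types_alt (pubs : List (List (String × String))) (only_2019_plus : Bool) : List (String × Int) :=
  let tally : PySem.Dict String Int :=
    pubs.foldl
      (fun d pub =>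
        let pd := PySem.Dict.ofList pub
        if only_2019_plus && !(pubYear2019plus pd) then d
        else
          match pd.get? "Publication Type" with
          | none => d
          | some ptype =>
            if ptype = "" then d
            else d.insert ptype (d.getD ptype 0 + 1))
      PySem.Dict.empty
  let counts : PySem.Dict String Int :=
    aggScheme.foldl
      (fun d gt => d.insert gt.1 ((gt.2.map (fun t => tally.getD t 0)).sum)) PySem.Dict.empty
  let known : PySem.Set String := PySem.Set.ofList (aggScheme.flatMap (fun gt => gt.2))
  let extra : Int := (((tally.items.filter (fun p => !(known.contains p.1))).map (fun p => p.2)).sum)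
  (counts.modify "agg_other" 0 (· + extra)).items

-- ===== PRECONDITION & SPEC =====
def Spec_count_agg_types (pubs : List (List (String × String))) (only_2019_plus : Bool) (out : List (String × Int)) : Prop := out = count_agg_types_alt pubs only_2019_plus
instance (pubs : List (List (String × String))) (only_2019_plus : Bool) (out : List (String × Int)) : Decidable (Spec_count_agg_types pubs only_2019_plus out) := by unfold Spec_count_agg_types; infer_instance

-- ===== CLAIM (what is proved, stated in full; the proofs are below) =====
def Claim_equal_count_agg_types : Prop := ∀ (pubs : List (List (String × String))) (only_2019_plus : Bool), Dom_count_agg_types pubs only_2019_plus → Spec_count_agg_types pubs only_2019_plus (count_agg_types pubs only_2019_plus)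

-- ===== LEMMAS AND PROOFS =====

-- the Publication Type values of the publications that survive the three filters, in order
def perPub (only : Bool) (pub : List (String × String)) : List String :=
  let pd := PySem.Dict.ofList pub
  if only && !(pubYear2019plus pd) then []
  else
    match pd.get? "Publication Type" with
    | none => []
    | some ptype => if ptype = "" then [] else [ptype]

def keptTypes (pubs : List (List (String × String))) (only : Bool) : List String :=
  pubs.flatMap (perPub only)

-- both loops over pubs are the corresponding fold over the kept Publication Type values
theorem foldl_kept {α : Type} (g : α → String → α) (only : Bool) (pubs : List (List (String × String))) (init : α) :
    pubs.foldl
      (fun acc pub =>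
        let pd := PySem.Dict.ofList pub
        if only && !(pubYear2019plus pd) then acc
        else
          match pd.get? "Publication Type" with
          | none => acc
          | some ptype => if ptype = "" then acc else g acc ptype)
      init
    = (keptTypes pubs only).foldl g init := by
  induction pubs generalizing init with
  | nil => rfl
  | cons pub rest ih =>
    rw [List.foldl_cons, ih]
    simp only [keptTypes, List.flatMap_cons, List.foldl_append]
    congr 1
    simp only [perPub]
    split
    · rfl
    · cases h : (PySem.Dict.ofList pub).get? "Publication Type" with
      | none => rfl
      | some ptype => by_cases hp : ptype = "" <;> simp [hp]

-- A's loop body for one kept ptype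
def procA (counts : PySem.Dict String Int) (ptype : String) : PySem.Dict String Int :=
  match typeToGroup.get? ptype with
  | some grp =>
    if grp ≠ "" then counts.modify grp 0 (· + 1)
    else counts.modify "agg_other" 0 (· + 1)
  | none => counts.modify "agg_other" 0 (· + 1)

-- the group A charges a kept ptype to
def assignGroup (t : String) : String :=
  match typeToGroup.get? t with
  | some g => g
  | none => "agg_other"

-- concrete facts about the scheme and the reverse index
theorem vals_ne_empty : ∀ v ∈ typeToGroup.values, v ≠ "" := by decide
theorem vals_mem_aggKeys : ∀ v ∈ typeToGroup.values, v ∈ aggScheme.map (fun gt => gt.1) := by decide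
theorem t2g_keys_eq : typeToGroup.keys = PySem.Set.ofList (aggScheme.flatMap (fun gt => gt.2)) := by decide
theorem items_group_iff : ∀ p ∈ aggScheme, ∀ q ∈ typeToGroup.items, (q.2 = p.1 ↔ q.1 ∈ p.2) := by decide
theorem scheme_types_known : ∀ p ∈ aggScheme, ∀ t ∈ p.2, t ∈ aggScheme.flatMap (fun gt => gt.2) := by decide
theorem scheme_types_nodup : ∀ p ∈ aggScheme, p.2.Nodup := by decide
theorem aggKeys_nodup : (aggScheme.map (fun gt => gt.1)).Nodup := by decide
theorem other_mem_aggKeys : "agg_other" ∈ aggScheme.map (fun gt => gt.1) := by decide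
theorem countsInit_keys : countsInit.keys = aggScheme.map (fun gt => gt.1) := by decide
theorem countsInit_getD : ∀ k ∈ aggScheme.map (fun gt => gt.1), countsInit.getD k 0 = 0 := by decide

theorem procA_eq (d : PySem.Dict String Int) (t : String) :
    procA d t = d.modify (assignGroup t) 0 (· + 1) := by
  unfold procA assignGroup
  cases h : typeToGroup.get? t with
  | none => rfl
  | some g =>
    have hmem : (t, g) ∈ typeToGroup.items := PySem.Dict.mem_items_of_get?_eq_some _ h
    have hg : g ≠ "" := vals_ne_empty g (List.mem_map_of_mem hmem)
    simp [hg]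

theorem assign_mem (t : String) : assignGroup t ∈ aggScheme.map (fun gt => gt.1) := by
  unfold assignGroup
  cases h : typeToGroup.get? t with
  | none => exact other_mem_aggKeys
  | some g =>
    exact vals_mem_aggKeys g (List.mem_map_of_mem (PySem.Dict.mem_items_of_get?_eq_some _ h))

theorem keys_foldA (kt : List String) :
    ∀ d : PySem.Dict String Int, d.keys = aggScheme.map (fun gt => gt.1) →
      (kt.foldl procA d).keys = aggScheme.map (fun gt => gt.1) := by
  induction kt with
  | nil => intro d hd; exact hd
  | cons t kt ih =>
    intro d hd
    rw [List.foldl_cons, procA_eq]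
    have hc : d.contains (assignGroup t) = true :=
      (PySem.Dict.contains_iff_mem_keys _ _).2 (hd ▸ assign_mem t)
    have hk : (d.modify (assignGroup t) 0 (· + 1)).keys = aggScheme.map (fun gt => gt.1) := by
      rw [PySem.Dict.keys_modify, PySem.Dict.keys_insert_of_contains _ _ hc, hd]
    exact ih _ hk

theorem getD_foldA (kt : List String) :
    ∀ (d : PySem.Dict String Int) (k : String),
      (kt.foldl procA d).getD k 0 = d.getD k 0 + ((kt.map assignGroup).count k : Int) := by
  induction kt with
  | nil => intro d k; simp
  | cons t kt ih =>
    intro d k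
    rw [List.foldl_cons, procA_eq, ih, List.map_cons, PySem.Dict.getD_modify]
    by_cases hk : k = assignGroup t
    · subst hk
      simp
      ring
    · rw [if_neg hk]
      have : (assignGroup t == k) = false := by
        simp
        exact fun h => hk h.symm
      simp [List.count_cons, this]

-- A's result, characterised over the kept ptypes
theorem A_char (pubs : List (List (String × String))) (only : Bool) :
    count_agg_types pubs only =
      (aggScheme.map (fun gt => gt.1)).map
        (fun k => (k, (((keptTypes pubs only).map assignGroup).count k : Int))) := by
  have h1 : count_agg_types pubs only = ((keptTypes pubs only).foldl procA countsInit).items :=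
    congrArg PySem.Dict.items (foldl_kept procA only pubs countsInit)
  have hkeys : ((keptTypes pubs only).foldl procA countsInit).keys = aggScheme.map (fun gt => gt.1) :=
    keys_foldA _ countsInit countsInit_keys
  rw [h1, PySem.Dict.items_eq_map_keys _ (hkeys ▸ aggKeys_nodup) 0, hkeys]
  refine List.map_congr_left (fun k hk => ?_)
  rw [getD_foldA, countsInit_getD k hk]
  simp

-- countP of a disjunction of disjoint predicates splits
theorem countP_or_disjoint {α : Type} (l : List α) (p q : α → Bool)
    (h : ∀ x ∈ l, ¬(p x = true ∧ q x = true)) :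
    l.countP (fun x => p x || q x) = l.countP p + l.countP q := by
  induction l with
  | nil => rfl
  | cons a l ih =>
    have ha := h a (List.mem_cons_self)
    have ih' := ih (fun x hx => h x (List.mem_cons_of_mem _ hx))
    by_cases hp : p a <;> by_cases hq : q a <;>
      simp [hp, hq, ih'] <;> first | omega | exact absurd ⟨hp, hq⟩ ha

-- summing counts over a duplicate-free list of values is one countP
theorem sum_counts (ts : List String) (kt : List String) (h : ts.Nodup) :
    ((ts.map (fun t => (kt.count t : Int))).sum) = ((kt.countP (fun x => decide (x ∈ ts)) : Int)) := by
  induction ts with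
  | nil => simp
  | cons a ts ih =>
    have hna : a ∉ ts := (List.nodup_cons.1 h).1
    have ih' := ih (List.nodup_cons.1 h).2
    have hsplit : kt.countP (fun x => (x == a) || decide (x ∈ ts)) =
        kt.countP (fun x => x == a) + kt.countP (fun x => decide (x ∈ ts)) :=
      countP_or_disjoint kt _ _ (by
        intro x hx hcon
        exact hna ((eq_of_beq hcon.1) ▸ of_decide_eq_true hcon.2))
    have hcongr : kt.countP (fun x => decide (x ∈ a :: ts)) =
        kt.countP (fun x => (x == a) || decide (x ∈ ts)) := by
      refine List.countP_congr (fun x hx => ?_)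
      simp [List.mem_cons, beq_iff_eq]
    rw [List.map_cons, List.sum_cons, ih', hcongr, hsplit, List.count_eq_countP]
    push_cast
    ring

-- membership in the known-types set is membership among typeToGroup's keys
theorem known_contains_iff (t : String) :
    (PySem.Set.ofList (aggScheme.flatMap (fun gt => gt.2))).contains t = true ↔
      t ∈ typeToGroup.keys := by
  rw [t2g_keys_eq]
  exact List.contains_iff_mem

-- which ptypes A charges to a given group, as a condition on the ptype
theorem assign_iff (gt : String × List String) (hg : gt ∈ aggScheme) (t : String) :
    assignGroup t = gt.1 ↔ (t ∈ gt.2 ∨ (gt.1 = "agg_other" ∧ t ∉ typeToGroup.keys)) := by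
  unfold assignGroup
  cases h : typeToGroup.get? t with
  | none =>
    have hk : t ∉ typeToGroup.keys := (PySem.Dict.get?_eq_none_iff_not_mem_keys _ _).1 h
    constructor
    · intro he; exact Or.inr ⟨he.symm, hk⟩
    · rintro (htm | ⟨ho, _⟩)
      · refine absurd ?_ hk
        rw [t2g_keys_eq]
        exact (PySem.Set.mem_ofList _ _).2 (List.mem_flatMap.2 ⟨gt, hg, htm⟩)
      · exact ho.symm
  | some g =>
    have hq : (t, g) ∈ typeToGroup.items := PySem.Dict.mem_items_of_get?_eq_some _ h
    have hiff := items_group_iff gt hg (t, g) hq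
    have hk : t ∈ typeToGroup.keys := PySem.Dict.mem_keys_of_mem_items _ hq
    constructor
    · intro he; exact Or.inl (hiff.1 he)
    · rintro (htm | ⟨_, hnk⟩)
      · exact hiff.2 htm
      · exact absurd hk hnk

-- per-group agreement between A's per-item counting and B's tally aggregation
theorem per_group (gt : String × List String) (hg : gt ∈ aggScheme) (kt : List String) :
    (((kt.map assignGroup).count gt.1 : Int)) =
      ((gt.2.map (fun t => (kt.count t : Int))).sum) +
        (if gt.1 = "agg_other"
         then ((kt.countP (fun x => !((PySem.Set.ofList (aggScheme.flatMap (fun g => g.2))).contains x)) : Int))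
         else 0) := by
  rw [List.count_eq_countP, List.countP_map, sum_counts gt.2 kt (scheme_types_nodup gt hg)]
  by_cases ho : gt.1 = "agg_other"
  · have hcongr : kt.countP ((fun x => x == gt.1) ∘ assignGroup) =
        kt.countP (fun x => decide (x ∈ gt.2) ||
          !((PySem.Set.ofList (aggScheme.flatMap (fun g => g.2))).contains x)) := by
      refine List.countP_congr (fun x hx => ?_)
      simp only [Function.comp, beq_iff_eq, Bool.or_eq_true, decide_eq_true_eq,
        Bool.not_eq_true', ← Bool.not_eq_true]
      rw [assign_iff gt hg x]
      constructor
      · rintro (h1 | ⟨_, h2⟩)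
        · exact Or.inl h1
        · exact Or.inr (fun hc => h2 ((known_contains_iff x).1 hc))
      · rintro (h1 | h2)
        · exact Or.inl h1
        · exact Or.inr ⟨ho, fun hm => h2 ((known_contains_iff x).2 hm)⟩
    have hsplit := countP_or_disjoint kt (fun x => decide (x ∈ gt.2))
        (fun x => !((PySem.Set.ofList (aggScheme.flatMap (fun g => g.2))).contains x))
        (by
          intro x hx hcon
          have hm : x ∈ aggScheme.flatMap (fun g => g.2) :=
            scheme_types_known gt hg x (of_decide_eq_true hcon.1)
          have hc : (PySem.Set.ofList (aggScheme.flatMap (fun g => g.2))).contains x = true :=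
            (known_contains_iff x).2 (by rw [t2g_keys_eq]; exact (PySem.Set.mem_ofList _ _).2 hm)
          have h2 : (!((PySem.Set.ofList (aggScheme.flatMap (fun g => g.2))).contains x)) = true :=
            hcon.2
          rw [hc] at h2
          simp at h2)
    rw [if_pos ho, hcongr, hsplit]
    push_cast
    ring
  · have hcongr : kt.countP ((fun x => x == gt.1) ∘ assignGroup) =
        kt.countP (fun x => decide (x ∈ gt.2)) := by
      refine List.countP_congr (fun x hx => ?_)
      simp only [Function.comp, beq_iff_eq, decide_eq_true_eq]
      rw [assign_iff gt hg x]
      constructor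
      · rintro (h1 | ⟨h2, _⟩)
        · exact h1
        · exact absurd h2 ho
      · exact Or.inl
    rw [if_neg ho, hcongr, add_zero]

-- the tally entry of a type is its count among the kept ptypes
theorem S_eq (gt : String × List String) (kt : List String) :
    (gt.2.map (fun t => (PySem.Dict.counter kt).getD t 0)).sum =
      (gt.2.map (fun t => (kt.count t : Int))).sum :=
  congrArg List.sum (List.map_congr_left fun t _ => PySem.Dict.getD_counter kt t)

-- the unlisted-tallied-types correction is one countP over the kept ptypes
theorem extra_eq (kt : List String) :
    (((PySem.Dict.counter kt).items.filter
        (fun p => !((PySem.Set.ofList (aggScheme.flatMap (fun g => g.2))).contains p.1))).map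
      (fun p => p.2)).sum =
      ((kt.countP (fun x => !((PySem.Set.ofList (aggScheme.flatMap (fun g => g.2))).contains x)) : Int)) := by
  rw [PySem.Dict.items_counter, List.filter_map, List.map_map]
  have hcomp1 : ((fun p : String × Int =>
      !((PySem.Set.ofList (aggScheme.flatMap (fun g => g.2))).contains p.1)) ∘
        (fun k => (k, (kt.count k : Int)))) =
      fun k => !((PySem.Set.ofList (aggScheme.flatMap (fun g => g.2))).contains k) := rfl
  have hcomp2 : ((fun p : String × Int => p.2) ∘ (fun k => (k, (kt.count k : Int)))) =
      fun k => (kt.count k : Int) := rfl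
  rw [hcomp1, hcomp2,
    sum_counts _ kt (List.Nodup.filter _ (PySem.Set.nodup_ofList kt))]
  congr 1
  refine List.countP_congr (fun x hx => ?_)
  simp only [decide_eq_true_eq, List.mem_filter]
  constructor
  · rintro ⟨_, h2⟩; exact h2
  · intro h2; exact ⟨(PySem.Set.mem_ofList kt x).2 hx, h2⟩

-- B's result, characterised over the kept ptypes
theorem B_char (pubs : List (List (String × String))) (only : Bool) :
    count_agg_types_alt pubs only =
      aggScheme.map (fun gt => (gt.1,
        (gt.2.map (fun t => ((keptTypes pubs only).count t : Int))).sum +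
          (if gt.1 = "agg_other"
           then (((keptTypes pubs only).countP
             (fun x => !((PySem.Set.ofList (aggScheme.flatMap (fun g => g.2))).contains x)) : Int))
           else 0))) := by
  have htally : (pubs.foldl
      (fun d pub =>
        let pd := PySem.Dict.ofList pub
        if only && !(pubYear2019plus pd) then d
        else
          match pd.get? "Publication Type" with
          | none => d
          | some ptype =>
            if ptype = "" then d
            else d.insert ptype (d.getD ptype 0 + 1))
      (PySem.Dict.empty : PySem.Dict String Int)) = PySem.Dict.counter (keptTypes pubs only) := by
    rw [foldl_kept (g := fun (d : PySem.Dict String Int) (ptype : String) =>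
      d.insert ptype (d.getD ptype 0 + 1)) only pubs]
    exact PySem.Dict.foldl_insert_getD_add_one_eq_counter _
  simp only [count_agg_types_alt]
  rw [htally]
  have hitems : (aggScheme.foldl
      (fun d gt => d.insert gt.1
        ((gt.2.map (fun t => (PySem.Dict.counter (keptTypes pubs only)).getD t 0)).sum))
      (PySem.Dict.empty : PySem.Dict String Int)).items =
      aggScheme.map (fun gt => (gt.1,
        (gt.2.map (fun t => (PySem.Dict.counter (keptTypes pubs only)).getD t 0)).sum)) := by
    have h := PySem.Dict.items_foldl_insert_fresh aggScheme (fun gt => gt.1)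
      (fun gt => (gt.2.map (fun t => (PySem.Dict.counter (keptTypes pubs only)).getD t 0)).sum)
      PySem.Dict.empty (fun a _ => PySem.Dict.contains_empty _) aggKeys_nodup
    simpa using h
  set C := aggScheme.foldl
      (fun d gt => d.insert gt.1
        ((gt.2.map (fun t => (PySem.Dict.counter (keptTypes pubs only)).getD t 0)).sum))
      (PySem.Dict.empty : PySem.Dict String Int) with hC
  have hkeysC : C.keys = aggScheme.map (fun gt => gt.1) := by
    have h0 : C.keys = C.items.map (fun p => p.1) := rfl
    rw [h0, hitems, List.map_map]
    rfl
  have hco : C.contains "agg_other" = true :=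
    (PySem.Dict.contains_iff_mem_keys _ _).2 (by rw [hkeysC]; exact other_mem_aggKeys)
  set extra := (((PySem.Dict.counter (keptTypes pubs only)).items.filter
      (fun p => !((PySem.Set.ofList (aggScheme.flatMap (fun gt => gt.2))).contains p.1))).map
    (fun p => p.2)).sum with hextra
  have hkeysF : (C.modify "agg_other" 0 (· + extra)).keys = aggScheme.map (fun gt => gt.1) := by
    rw [PySem.Dict.keys_modify, PySem.Dict.keys_insert_of_contains _ _ hco, hkeysC]
  rw [PySem.Dict.items_eq_map_keys _ (by rw [hkeysF]; exact aggKeys_nodup) 0, hkeysF,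
    List.map_map]
  refine List.map_congr_left (fun gt hg => ?_)
  simp only [Function.comp]
  have hCgetD : C.getD gt.1 0 =
      (gt.2.map (fun t => (PySem.Dict.counter (keptTypes pubs only)).getD t 0)).sum :=
    PySem.Dict.getD_of_mem_items _ (by rw [hitems]; exact List.mem_map_of_mem hg)
      (by rw [hkeysC]; exact aggKeys_nodup) 0
  rw [PySem.Dict.getD_modify]
  by_cases ho : gt.1 = "agg_other"
  · rw [if_pos ho, if_pos ho, ← ho, hCgetD, S_eq, hextra, extra_eq]
  · rw [if_neg ho, if_neg ho, hCgetD, S_eq, add_zero]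

-- ===== VERDICT (by name: the statement is the Claim_ definition above) =====
theorem count_agg_types_spec : Claim_equal_count_agg_types := by
  intro pubs only _
  unfold Spec_count_agg_types
  rw [A_char, B_char, List.map_map]
  refine List.map_congr_left (fun gt hg => ?_)
  simp only [Function.comp]
  exact congrArg (Prod.mk gt.1) (per_group gt hg (keptTypes pubs only))
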